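-- pv_equiv track=rewrite | github.com/GustavoHCruz/SplicingSitesIdentifierCNN | algorithms/Module 1 - Selection.py | make_introns_list
-- ===== SOURCE A (Python) =====
-- def make_introns_list(exons_list, length):
--   i = 0
--   seq = []
--   if exons_list[i][0] != 0:
--     seq.append([0, exons_list[i][0]-1])
--   while i < len(exons_list) - 1:
--     seq.append([exons_list[i][1]+1, exons_list[i+1][0]-1])
--     i += 1
--   if exons_list[-1][1] != length - 1:
--     seq.append([exons_list[-1][1]+1, length-1])
--
--   return seq
-- ===== SOURCE B (Python) =====
-- def make_introns_list(exons_list, length):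
--   lefts = [0] + [e[1] + 1 for e in exons_list]
--   rights = [e[0] - 1 for e in exons_list] + [length - 1]
--   gaps = [[l, r] for l, r in zip(lefts, rights)]
--   if exons_list[0][0] == 0:
--     gaps = gaps[1:]
--   if exons_list[-1][1] == length - 1:
--     gaps = gaps[:-1]
--   return gaps
-- ===== Notes on version B (the rewrite author's own statement) =====
-- stated objective: alternative
-- what changed: A walks indices with a while loop, special-casing the first exon and re-reading exons_list[-1] for the tail; B has no gap-emitting loop: it builds the two shifted boundary lists ([0]+ends+1 and starts-1+[length-1]), zips them into the full candidate gap list, and then trims the leading/trailing entry by slicing when the first exon starts at 0 or the last ends at length-1.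
import Mathlib
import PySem

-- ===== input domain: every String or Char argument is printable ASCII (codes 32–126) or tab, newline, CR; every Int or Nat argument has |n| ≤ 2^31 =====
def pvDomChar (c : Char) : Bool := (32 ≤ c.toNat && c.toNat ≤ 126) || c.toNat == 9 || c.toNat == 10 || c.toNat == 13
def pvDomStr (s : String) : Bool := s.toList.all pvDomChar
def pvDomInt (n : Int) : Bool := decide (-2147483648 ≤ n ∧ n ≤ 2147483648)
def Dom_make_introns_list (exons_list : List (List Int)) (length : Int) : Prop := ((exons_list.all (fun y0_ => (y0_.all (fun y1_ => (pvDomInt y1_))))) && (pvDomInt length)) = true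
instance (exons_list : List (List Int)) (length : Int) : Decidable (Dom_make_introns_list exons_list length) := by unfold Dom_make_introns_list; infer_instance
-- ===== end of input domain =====

-- B replaces A's index-pairing while loop by zipping two shifted boundary lists into the
-- full candidate gap list and then trimming its edges by slicing; objective: alternative.

-- xs[j] with default for the IndexError case; the default is only reached outside Pre_.
def pvG (e : List Int) (j : Int) : Int := (PySem.List.pyGet? e j).getD 0
def pvG2 (xs : List (List Int)) (i j : Int) : Int := pvG ((PySem.List.pyGet? xs i).getD []) j

-- ===== PORT A =====
def make_introns_list (exons_list : List (List Int)) (length : Int) : List (List Int) :=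
  -- i = 0; seq = []
  let seq : List (List Int) :=
    if pvG2 exons_list 0 0 ≠ 0 then [[0, pvG2 exons_list 0 0 - 1]] else []
  -- while i < len(exons_list) - 1
  let seq := (List.range (exons_list.length - 1)).foldl
    (fun acc (i : Nat) => acc ++ [[pvG2 exons_list (i : Int) 1 + 1, pvG2 exons_list ((i : Int) + 1) 0 - 1]]) seq
  if pvG2 exons_list (-1) 1 ≠ length - 1 then
    seq ++ [[pvG2 exons_list (-1) 1 + 1, length - 1]]
  else seq

-- ===== PORT B =====
def make_introns_list_alt (exons_list : List (List Int)) (length : Int) : List (List Int) :=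
  let lefts : List Int := 0 :: exons_list.map (fun e => pvG e 1 + 1)
  let rights : List Int := exons_list.map (fun e => pvG e 0 - 1) ++ [length - 1]
  let gaps := (lefts.zip rights).map (fun p => [p.1, p.2])
  let gaps := if pvG2 exons_list 0 0 = 0 then PySem.List.slice gaps (some 1) none else gaps
  let gaps := if pvG2 exons_list (-1) 1 = length - 1 then PySem.List.slice gaps none (some (-1)) else gaps
  gaps

-- ===== PRECONDITION & SPEC =====
-- Exactly where Python A returns normally: it indexes exons_list[0] (IndexError on []) and
-- reads index 0 and 1 of every exon (IndexError on an inner list shorter than 2).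
def Pre_make_introns_list (exons_list : List (List Int)) (length : Int) : Prop :=
  exons_list ≠ [] ∧ ∀ e ∈ exons_list, 2 ≤ e.length
instance (exons_list : List (List Int)) (length : Int) : Decidable (Pre_make_introns_list exons_list length) := by unfold Pre_make_introns_list; infer_instance
def pvWitness_make_introns_list : List (List Int) × Int := ([[0, 4], [10, 14]], 20)

def Spec_make_introns_list (exons_list : List (List Int)) (length : Int) (out : List (List Int)) : Prop := out = make_introns_list_alt exons_list length
instance (exons_list : List (List Int)) (length : Int) (out : List (List Int)) : Decidable (Spec_make_introns_list exons_list length out) := by unfold Spec_make_introns_list; infer_instance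

-- ===== CLAIM (what is proved, stated in full; the proofs are below) =====
def Claim_equal_make_introns_list : Prop := ∀ (exons_list : List (List Int)) (length : Int), Dom_make_introns_list exons_list length → Pre_make_introns_list exons_list length → Spec_make_introns_list exons_list length (make_introns_list exons_list length)

-- ===== LEMMAS AND PROOFS =====

-- the gap intervals emitted from cursor position pos onward, and the final cursor
def pvGaps (pos : Int) : List (List Int) → List (List Int)
  | [] => []
  | e :: t => [pos, pvG e 0 - 1] :: pvGaps (pvG e 1 + 1) t

def pvEnd (pos : Int) : List (List Int) → Int
  | [] => pos
  | e :: t => pvEnd (pvG e 1 + 1) t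

lemma foldA_char (t : List (List Int)) :
    ∀ (e : List Int) (seq : List (List Int)),
    (List.range t.length).foldl
      (fun acc (i : Nat) => acc ++ [[pvG2 (e :: t) (i : Int) 1 + 1, pvG2 (e :: t) ((i : Int) + 1) 0 - 1]]) seq
    = seq ++ pvGaps (pvG e 1 + 1) t := by
  induction t with
  | nil => intro e seq; simp [pvGaps]
  | cons f t ih =>
    intro e seq
    simp only [List.length_cons]
    rw [List.range_succ_eq_map]
    simp only [List.foldl_cons, List.foldl_map, Nat.succ_eq_add_one]
    have h0 : pvG2 (e :: f :: t) (((0 : Nat) : Int)) 1 = pvG e 1 := by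
      simp [pvG2, PySem.List.pyGet?_zero]
    have h1 : pvG2 (e :: f :: t) (((0 : Nat) : Int) + 1) 0 = pvG f 0 := by
      have : (((0 : Nat) : Int) + 1) = ((1 : Nat) : Int) := by norm_num
      rw [this]
      simp [pvG2, PySem.List.pyGet?_natCast]
    rw [h0, h1]
    have hfun : (fun (acc : List (List Int)) (i : Nat) =>
          acc ++ [[pvG2 (e :: f :: t) ((i + 1 : Nat) : Int) 1 + 1,
                   pvG2 (e :: f :: t) (((i + 1 : Nat) : Int) + 1) 0 - 1]])
        = (fun (acc : List (List Int)) (i : Nat) =>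
          acc ++ [[pvG2 (f :: t) (i : Int) 1 + 1, pvG2 (f :: t) ((i : Int) + 1) 0 - 1]]) := by
      funext acc i
      have g1 : pvG2 (e :: f :: t) ((i + 1 : Nat) : Int) 1 = pvG2 (f :: t) (i : Int) 1 := by
        simp [pvG2]
      have g2 : pvG2 (e :: f :: t) (((i + 1 : Nat) : Int) + 1) 0 = pvG2 (f :: t) ((i : Int) + 1) 0 := by
        have e1 : (((i + 1 : Nat) : Int) + 1) = ((i + 2 : Nat) : Int) := by push_cast; ring
        have e2 : ((i : Int) + 1) = ((i + 1 : Nat) : Int) := by push_cast; ring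
        rw [e1, e2]
        simp only [pvG2]
        rw [PySem.List.pyGet?_natCast, PySem.List.pyGet?_natCast]
        simp
      rw [g1, g2]
    rw [hfun, ih f]
    simp [pvGaps]

lemma last_char (t : List (List Int)) :
    ∀ (e : List Int), pvG2 (e :: t) (-1) 1 + 1 = pvEnd (pvG e 1 + 1) t := by
  induction t with
  | nil => intro e; simp [pvG2, pvEnd, PySem.List.pyGet?_neg_one]
  | cons f t ih =>
    intro e
    simp only [pvEnd]
    rw [← ih f]
    simp [pvG2, PySem.List.pyGet?_neg_one, List.getLast?_cons_cons]

-- B's zipped candidate list is the full gap list: each exon's pre-gap plus the final tail gap.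
lemma zip_char (exons : List (List Int)) :
    ∀ (pos length : Int),
    ((pos :: exons.map (fun e => pvG e 1 + 1)).zip
        (exons.map (fun e => pvG e 0 - 1) ++ [length - 1])).map (fun p => [p.1, p.2])
    = pvGaps pos exons ++ [[pvEnd pos exons, length - 1]] := by
  induction exons with
  | nil => intro pos length; simp [pvGaps, pvEnd]
  | cons e t ih =>
    intro pos length
    simp only [List.map_cons, List.cons_append, List.zip_cons_cons, pvGaps, pvEnd]
    rw [ih]

-- ===== VERDICT (by name: the statement is the Claim_ definition above) =====
theorem make_introns_list_spec : Claim_equal_make_introns_list := by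
  intro exons_list length _dom pre
  obtain ⟨hne, _⟩ := pre
  obtain ⟨e, t, rfl⟩ := List.exists_cons_of_ne_nil hne
  unfold Spec_make_introns_list make_introns_list make_introns_list_alt
  have hlen : (e :: t).length - 1 = t.length := by simp
  have h00 : pvG2 (e :: t) 0 0 = pvG e 0 := by simp [pvG2]
  have hG := zip_char t (pvG e 1 + 1) length
  have hlast := last_char t e
  simp only [hlen, List.map_cons, List.cons_append, List.zip_cons_cons, List.map_cons] at *
  rw [foldA_char, hG, h00]
  set G := pvGaps (pvG e 1 + 1) t with hGdef
  set E := pvEnd (pvG e 1 + 1) t with hEdef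
  -- last condition: pvG2 (e::t) (-1) 1 = E - 1
  have hL : pvG2 (e :: t) (-1) 1 = E - 1 := by omega
  rw [hL]
  by_cases hs : pvG e 0 = 0 <;> by_cases he : E - 1 = length - 1 <;>
    simp only [hs, he, if_pos, if_neg, ite_true, ite_false, ne_eq, not_true_eq_false,
      not_false_eq_true, if_true, if_false, sub_left_inj] <;>
    simp [hs, he, PySem.List.slice_from_one, PySem.List.slice_to_neg_one,
      List.dropLast_concat, List.dropLast_append_cons, sub_add_cancel]
  rw [show ([0, pvG e 0 - 1] :: (G ++ [[E, length - 1]]))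
        = (([0, pvG e 0 - 1] :: G) ++ [[E, length - 1]]) from by simp,
     List.dropLast_concat]
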